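-- pv_equiv track=rewrite | github.com/Champ-Deep/Graphiti-knowledge-graph | services/outreach_personalizer.py | _infer_buying_stage
-- ===== SOURCE A (Python) =====
-- from typing import Dict, List, Optional, Any
--
-- def _infer_buying_stage(intent_data: Dict[str, Any]) -> str:
--     """Infer buying stage from intent signals"""
--     signals = intent_data.get('signals', [])
--
--     if any(s in ['pricing_interest', 'sales_inquiry'] for s in signals):
--         return 'decision'
--     elif any(s in ['product_research', 'validation_seeking'] for s in signals):
--         return 'consideration'
--     else:
--         return 'awareness'
-- ===== SOURCE B (Python) =====
-- def _infer_buying_stage(intent_data):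
--     """Infer buying stage from intent signals (single table-driven pass)."""
--     RANK = {'pricing_interest': 2, 'sales_inquiry': 2,
--             'product_research': 1, 'validation_seeking': 1}
--     best = 0
--     for s in intent_data.get('signals', []):
--         best = max(best, RANK.get(s, 0))
--     return 'decision' if best == 2 else 'consideration' if best == 1 else 'awareness'
-- ===== Notes on version B (the rewrite author's own statement) =====
-- stated objective: simpler
-- what changed: Replaced the two separate any-membership scans over signals with a single pass that folds a max priority rank from a signal->rank table, then maps the final rank back to a stage name.
import Mathlib
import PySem

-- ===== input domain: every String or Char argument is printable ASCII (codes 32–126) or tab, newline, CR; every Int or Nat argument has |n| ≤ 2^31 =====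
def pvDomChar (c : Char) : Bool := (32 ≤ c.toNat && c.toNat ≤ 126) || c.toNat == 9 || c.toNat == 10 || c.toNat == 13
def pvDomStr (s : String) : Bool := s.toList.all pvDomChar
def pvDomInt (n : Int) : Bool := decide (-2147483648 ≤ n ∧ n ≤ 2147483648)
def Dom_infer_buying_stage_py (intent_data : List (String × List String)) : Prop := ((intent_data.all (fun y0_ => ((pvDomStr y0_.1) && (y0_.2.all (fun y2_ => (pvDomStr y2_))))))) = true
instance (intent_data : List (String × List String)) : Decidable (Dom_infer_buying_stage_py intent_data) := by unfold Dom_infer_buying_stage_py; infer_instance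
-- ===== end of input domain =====

-- B replaces A's two any-membership scans with a single table-driven pass folding a max rank (objective: simpler).


-- ===== PORT A =====
-- Literal port of A: intent_data.get('signals', []) (first-match lookup on the assoc list),
-- then two any-membership scans deciding 'decision' / 'consideration' / 'awareness'.
def infer_buying_stage_py (intent_data : List (String × List String)) : String :=
  let signals := ((intent_data.find? (fun p => p.1 == "signals")).map Prod.snd).getD []
  if signals.any (fun s => decide (s ∈ ["pricing_interest", "sales_inquiry"])) then
    "decision"
  else if signals.any (fun s => decide (s ∈ ["product_research", "validation_seeking"])) then
    "consideration"
  else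
    "awareness"

-- ===== PORT B =====
-- Port of B: a signal→rank table, one fold keeping the running max rank, then map the rank back.
def pvRankTable : PySem.Dict String Nat :=
  PySem.Dict.ofList [("pricing_interest", 2), ("sales_inquiry", 2), ("product_research", 1), ("validation_seeking", 1)]

def infer_buying_stage_py_alt (intent_data : List (String × List String)) : String :=
  let signals := ((intent_data.find? (fun p => p.1 == "signals")).map Prod.snd).getD []
  let best := signals.foldl (fun r s => max r (PySem.Dict.getD pvRankTable s 0)) 0
  if best = 2 then "decision" else if best = 1 then "consideration" else "awareness"

-- ===== PRECONDITION & SPEC =====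
def Spec_infer_buying_stage_py (intent_data : List (String × List String)) (out : String) : Prop := out = infer_buying_stage_py_alt intent_data
instance (intent_data : List (String × List String)) (out : String) : Decidable (Spec_infer_buying_stage_py intent_data out) := by unfold Spec_infer_buying_stage_py; infer_instance

-- ===== CLAIM (what is proved, stated in full; the proofs are below) =====
def Claim_equal_infer_buying_stage_py : Prop := ∀ (intent_data : List (String × List String)), Dom_infer_buying_stage_py intent_data → Spec_infer_buying_stage_py intent_data (infer_buying_stage_py intent_data)

-- ===== LEMMAS AND PROOFS =====

-- The value of B's fold, characterised by A's two any-scans.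
def pvBest (l : List String) : Nat :=
  if l.any (fun s => decide (s ∈ ["pricing_interest", "sales_inquiry"])) then 2
  else if l.any (fun s => decide (s ∈ ["product_research", "validation_seeking"])) then 1
  else 0

theorem pvRank_cases (s : String) :
    PySem.Dict.getD pvRankTable s 0 =
      (if s ∈ ["pricing_interest", "sales_inquiry"] then 2
       else if s ∈ ["product_research", "validation_seeking"] then 1 else 0) := by
  have htbl : pvRankTable = PySem.Dict.mk
      [("pricing_interest", 2), ("sales_inquiry", 2), ("product_research", 1), ("validation_seeking", 1)] := by rfl
  by_cases h1 : s = "pricing_interest"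
  · subst h1; decide
  by_cases h2 : s = "sales_inquiry"
  · subst h2; decide
  by_cases h3 : s = "product_research"
  · subst h3; decide
  by_cases h4 : s = "validation_seeking"
  · subst h4; decide
  simp [htbl, PySem.Dict.getD_eq_get?_getD, PySem.Dict.get?,
    Ne.symm h1, Ne.symm h2, Ne.symm h3, Ne.symm h4, h1, h2, h3, h4]

theorem pvFold_eq (l : List String) (acc : Nat) :
    l.foldl (fun r s => max r (PySem.Dict.getD pvRankTable s 0)) acc = max acc (pvBest l) := by
  induction l generalizing acc with
  | nil => simp [pvBest]
  | cons s t ih =>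
    simp only [List.foldl_cons]
    rw [ih, pvRank_cases]
    unfold pvBest
    by_cases hd : s ∈ ["pricing_interest", "sales_inquiry"] <;>
      by_cases hc : s ∈ ["product_research", "validation_seeking"] <;>
      simp only [hd, hc, List.any_cons, decide_true, decide_false, Bool.true_or, Bool.false_or,
        if_true, if_false] <;> split_ifs <;> omega

-- ===== VERDICT (by name: the statement is the Claim_ definition above) =====
theorem infer_buying_stage_py_spec : Claim_equal_infer_buying_stage_py := by
  intro intent_data _
  unfold Spec_infer_buying_stage_py infer_buying_stage_py infer_buying_stage_py_alt
  simp only [pvFold_eq]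
  generalize ((intent_data.find? (fun p => p.1 == "signals")).map Prod.snd).getD [] = l
  unfold pvBest
  split_ifs <;> simp_all
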